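-- pv_equiv track=rewrite | github.com/2weiEmu/Robit-Transpiler-Local | src/transpile.py | split_first_bool_op
-- ===== SOURCE A (Python) =====
-- def split_first_bool_op(source: str) -> list:
--     # ! <> has to have higher precedence or it selects < first, or > same goes for <= and >=
--     # TODO: come up with a better algorithm for splitting this string, because right now, this has some very specific criteria under which it works, which it should really not have
--     valid_booleans = ['OR', 'NOT', '<>', '<=', '>=', '=', '>', '<', 'AND']
--     # ! have to make sure its not in a bracket
--
--     # ? The way I do it here means that boolean operators have a certain precedence
--     # ? the precedence is as in the array, with = having the highest one
--     # ? this is because it would first match the latest and, before matching a AND for example.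
--     # TODO: Make sure to note this / make it clear to people!
--
--     # TODO: Add error checking, in case the statement brakes somehow, technically entering (( CAR AND FISH) )
--     # TODO: could break this mechanism (which probably means im not doing it right, let's be real)
--     # TODO: and even if I added .strip() this would still break it: ((car AND) fish)
--     # TODO: now we can fight over if that would be a valid statement.
--
--     # basically make sure that it does not take into account things inside a bracket (i.e. nested)
--     for operator in valid_booleans:
--         nesting = 0
--         for x in range(len(source) - (len(operator) - 1)):
--
--             if (source[x] == ")"):
--                 nesting -= 1
--             if (source[x] == "("):
--                 nesting += 1
--
--             if (source[x:x+len(operator)] == operator and nesting == 0):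
--
--                 return [operator, source[:x], source[x+len(operator):]]
-- ===== SOURCE B (Python) =====
-- def split_first_bool_op(source: str) -> list:
--     # One left-to-right pass builds a table of each operator's first
--     # top-level (depth-0) position; then a precedence-ordered lookup.
--     valid_booleans = ['OR', 'NOT', '<>', '<=', '>=', '=', '>', '<', 'AND']
--     first = {}
--     depth = 0
--     for x, ch in enumerate(source):
--         if ch == ')':
--             depth -= 1
--         elif ch == '(':
--             depth += 1
--         elif depth == 0:
--             for op in valid_booleans:
--                 if op not in first and source.startswith(op, x):
--                     first[op] = x
--     for op in valid_booleans:
--         if op in first: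
--             p = first[op]
--             return [op, source[:p], source[p + len(op):]]
--     return None
-- ===== Notes on version B (the rewrite author's own statement) =====
-- stated objective: alternative
-- what changed: A scans the string once per operator (nine nesting-tracking passes in precedence order); B makes a single depth-tracking left-to-right pass that records each operator's first top-level position in a dictionary and then picks the winner by one precedence-ordered lookup.
import Mathlib
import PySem

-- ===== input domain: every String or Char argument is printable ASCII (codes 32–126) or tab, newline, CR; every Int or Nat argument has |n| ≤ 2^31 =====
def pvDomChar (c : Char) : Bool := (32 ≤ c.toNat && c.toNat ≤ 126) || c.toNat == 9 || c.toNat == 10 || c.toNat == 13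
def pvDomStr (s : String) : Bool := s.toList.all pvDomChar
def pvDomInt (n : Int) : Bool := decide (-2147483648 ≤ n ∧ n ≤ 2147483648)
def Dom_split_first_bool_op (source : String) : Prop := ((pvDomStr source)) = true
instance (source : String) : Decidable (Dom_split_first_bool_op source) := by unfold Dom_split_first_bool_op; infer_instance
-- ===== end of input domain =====

-- B replaces A's nine separate scans (one per operator) by a single depth-tracking pass that
-- records each operator's first top-level position, followed by a precedence-ordered lookup (alternative decomposition).

-- the shared literal operator-precedence list (valid_booleans in both Pythons)
def pvOps : List (List Char) :=
  [['O','R'], ['N','O','T'], ['<','>'], ['<','='], ['>','='], ['='], ['>'], ['<'], ['A','N','D']]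

-- ===== PORT A =====
-- inner loop of A: for x in range(...) with the running 'nesting' counter
def pvAScan (src op : List Char) (xs : List Nat) (nesting : Int) : Option Nat :=
  match xs with
  | [] => none
  | x :: rest =>
      let c := src.getD x ' '
      let n1 := if c = ')' then nesting - 1 else nesting
      let n2 := if c = '(' then n1 + 1 else n1
      if (src.drop x).take op.length = op ∧ n2 = 0 then some x
      else pvAScan src op rest n2

-- outer loop of A over valid_booleans
def pvAOuter (src : List Char) (ops : List (List Char)) : Option (List String) :=
  match ops with
  | [] => none
  | op :: rest =>
      match pvAScan src op (List.range (src.length + 1 - op.length)) 0 with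
      | some x => some [String.ofList op, String.ofList (src.take x), String.ofList (src.drop (x + op.length))]
      | none => pvAOuter src rest

def split_first_bool_op (source : String) : Option (List String) :=
  pvAOuter source.toList pvOps

-- ===== PORT B =====
-- one step of B's inner 'for op in valid_booleans' table update at position i
def pvBStep (src : List Char) (i : Nat) (d : PySem.Dict (List Char) Nat) (op : List Char) :
    PySem.Dict (List Char) Nat :=
  if (d.get? op).isNone ∧ (src.drop i).take op.length = op then d.insert op i else d

-- B's single left-to-right pass maintaining the depth and the first-position table
def pvBScanGo (src : List Char) (ops : List (List Char)) (i : Nat) (rest : List Char)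
    (depth : Int) (first : PySem.Dict (List Char) Nat) : PySem.Dict (List Char) Nat :=
  match rest with
  | [] => first
  | ch :: tl =>
      if ch = ')' then pvBScanGo src ops (i + 1) tl (depth - 1) first
      else if ch = '(' then pvBScanGo src ops (i + 1) tl (depth + 1) first
      else if depth = 0 then pvBScanGo src ops (i + 1) tl depth (ops.foldl (pvBStep src i) first)
      else pvBScanGo src ops (i + 1) tl depth first

-- B's final precedence-ordered lookup
def pvBLookup (src : List Char) (first : PySem.Dict (List Char) Nat) (ops : List (List Char)) :
    Option (List String) :=
  match ops with
  | [] => none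
  | op :: rest =>
      match first.get? op with
      | some p => some [String.ofList op, String.ofList (src.take p), String.ofList (src.drop (p + op.length))]
      | none => pvBLookup src first rest

def split_first_bool_op_alt (source : String) : Option (List String) :=
  let src := source.toList
  pvBLookup src (pvBScanGo src pvOps 0 src 0 PySem.Dict.empty) pvOps

-- ===== PRECONDITION & SPEC =====
def Spec_split_first_bool_op (source : String) (out : Option (List String)) : Prop := out = split_first_bool_op_alt source
instance (source : String) (out : Option (List String)) : Decidable (Spec_split_first_bool_op source out) := by unfold Spec_split_first_bool_op; infer_instance

-- ===== CLAIM (what is proved, stated in full; the proofs are below) =====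
def Claim_equal_split_first_bool_op : Prop := ∀ (source : String), Dom_split_first_bool_op source → Spec_split_first_bool_op source (split_first_bool_op source)

-- ===== LEMMAS AND PROOFS =====

-- nesting/depth both compute the paren balance of the processed prefix
def pvStep (d : Int) (c : Char) : Int := if c = ')' then d - 1 else if c = '(' then d + 1 else d

def pvBal (l : List Char) : Int := l.foldl pvStep 0

-- the common "hit" condition: top-level position where the operator's slice matches
def pvC (src op : List Char) (x : Nat) : Bool :=
  decide ((src.drop x).take op.length = op) && decide (pvBal (src.take x) = 0)

-- a well-formed operator: nonempty and not starting with a parenthesis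
def pvGood (op : List Char) : Prop :=
  match op with
  | [] => False
  | c :: _ => c ≠ '(' ∧ c ≠ ')'

lemma pvBal_append (l : List Char) (c : Char) : pvBal (l ++ [c]) = pvStep (pvBal l) c := by
  simp [pvBal, List.foldl_append]

lemma pvBal_take_succ (src : List Char) (x : Nat) :
    pvBal (src.take (x + 1)) = pvStep (pvBal (src.take x)) (src.getD x ' ') := by
  rcases lt_or_ge x src.length with h | h
  · have ht : src.take (x + 1) = src.take x ++ [src[x]] := by
      rw [List.take_add_one, List.getElem?_eq_getElem h]; simp
    rw [ht, pvBal_append, List.getD_eq_getElem?_getD, List.getElem?_eq_getElem h]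
    simp
  · rw [List.take_add_one, List.getElem?_eq_none h]
    rw [List.getD_eq_getElem?_getD, List.getElem?_eq_none h]
    simp [pvStep]

lemma pvAStep_eq (d : Int) (c : Char) :
    (if c = '(' then (if c = ')' then d - 1 else d) + 1 else (if c = ')' then d - 1 else d)) =
      pvStep d c := by
  unfold pvStep
  by_cases h1 : c = ')' <;> by_cases h2 : c = '(' <;> simp_all

lemma pvMatch_getD {src op : List Char} {x : Nat} (hg : pvGood op)
    (hm : (src.drop x).take op.length = op) :
    src.getD x ' ' ≠ '(' ∧ src.getD x ' ' ≠ ')' := by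
  cases op with
  | nil => exact absurd hg (by simp [pvGood])
  | cons c op' =>
    cases hd : src.drop x with
    | nil => rw [hd] at hm; simp at hm
    | cons a b =>
      rw [hd] at hm
      have ha : a = c := by
        have := congrArg List.head? hm
        simpa using this
      have hx : src[x]? = some c := by
        have : (src.drop x)[0]? = some a := by rw [hd]; rfl
        rw [List.getElem?_drop] at this
        simpa [ha] using this
      have hgd : src.getD x ' ' = c := by
        rw [List.getD_eq_getElem?_getD, hx]; rfl
      rw [hgd]
      exact hg

lemma pvAScan_eq_find (src op : List Char) (hg : pvGood op) :
    ∀ (n s : Nat), pvAScan src op (List.range' s n) (pvBal (src.take s)) =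
      (List.range' s n).find? (pvC src op) := by
  intro n
  induction n with
  | zero => intro s; simp [pvAScan, List.range']
  | succ n ih =>
    intro s
    rw [List.range'_succ]
    have hstep : pvAScan src op (s :: List.range' (s + 1) n) (pvBal (src.take s)) =
        if (src.drop s).take op.length = op ∧ pvBal (src.take (s + 1)) = 0 then some s
        else pvAScan src op (List.range' (s + 1) n) (pvBal (src.take (s + 1))) := by
      simp only [pvAScan]
      rw [pvAStep_eq, ← pvBal_take_succ]
    rw [hstep]
    by_cases hm : (src.drop s).take op.length = op
    · have hpar := pvMatch_getD hg hm
      have hbal : pvBal (src.take (s + 1)) = pvBal (src.take s) := by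
        rw [pvBal_take_succ]
        unfold pvStep
        rw [if_neg hpar.2, if_neg hpar.1]
      by_cases hb : pvBal (src.take s) = 0
      · rw [if_pos ⟨hm, by rw [hbal]; exact hb⟩,
          List.find?_cons_of_pos (by simp [pvC, hm, hb])]
      · rw [if_neg (by rw [hbal]; exact fun h => hb h.2),
          List.find?_cons_of_neg (by simp [pvC, hb]), ih (s + 1)]
    · rw [if_neg (fun h => hm h.1),
        List.find?_cons_of_neg (by simp [pvC, hm]), ih (s + 1)]

lemma pvC_false_of_ge {src op : List Char} (hg : pvGood op) {x : Nat}
    (hx : src.length + 1 - op.length ≤ x) : pvC src op x = false := by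
  have hop : 1 ≤ op.length := by
    cases op with
    | nil => exact absurd hg (by simp [pvGood])
    | cons a b => simp
  have hne : (src.drop x).take op.length ≠ op := by
    intro h
    have hlen := congrArg List.length h
    simp only [List.length_take, List.length_drop] at hlen
    have h2 : op.length ≤ src.length - x := by
      rw [← hlen]; exact min_le_right _ _
    omega
  simp [pvC, hne]

lemma pvFind_range_stable (src op : List Char) (hg : pvGood op) {m : Nat}
    (h : src.length + 1 - op.length ≤ m) :
    (List.range m).find? (pvC src op) =
      (List.range (src.length + 1 - op.length)).find? (pvC src op) := by
  have hsplit : List.range m =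
      List.range (src.length + 1 - op.length) ++
        List.range' (src.length + 1 - op.length) (m - (src.length + 1 - op.length)) := by
    rw [List.range_eq_range', List.range_eq_range',
      show m = (src.length + 1 - op.length) + (m - (src.length + 1 - op.length)) by omega,
      ← List.range'_append_1]
    simp
  rw [hsplit, List.find?_append]
  have hnone : (List.range' (src.length + 1 - op.length)
      (m - (src.length + 1 - op.length))).find? (pvC src op) = none := by
    rw [List.find?_eq_none]
    intro x hx
    have h1 : src.length + 1 - op.length ≤ x := (List.mem_range'_1.mp hx).1
    simp [pvC_false_of_ge hg h1]
  rw [hnone]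
  cases (List.range (src.length + 1 - op.length)).find? (pvC src op) <;> rfl

-- B-side: the foldl over ops updates exactly the looked-up key
lemma pvFoldl_get?_not_mem (src : List Char) (i : Nat) (ops : List (List Char))
    (d : PySem.Dict (List Char) Nat) (op : List Char) (h : op ∉ ops) :
    (ops.foldl (pvBStep src i) d).get? op = d.get? op := by
  induction ops generalizing d with
  | nil => rfl
  | cons op0 rest ih =>
    have hne : op ≠ op0 := fun he => h (he ▸ List.mem_cons_self)
    have hr : op ∉ rest := fun hm => h (List.mem_cons_of_mem _ hm)
    rw [List.foldl_cons, ih _ hr]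
    unfold pvBStep
    split
    · exact PySem.Dict.get?_insert_of_ne d i hne
    · rfl

lemma pvFoldl_get?_mem (src : List Char) (i : Nat) (ops : List (List Char))
    (d : PySem.Dict (List Char) Nat) (op : List Char) (hmem : op ∈ ops) (hnd : ops.Nodup) :
    (ops.foldl (pvBStep src i) d).get? op =
      ((d.get? op).orElse (fun _ => if (src.drop i).take op.length = op then some i else none)) := by
  induction ops generalizing d with
  | nil => exact absurd hmem (by simp)
  | cons op0 rest ih =>
    rw [List.foldl_cons]
    by_cases he : op = op0
    · subst he
      have hr : op ∉ rest := (List.nodup_cons.mp hnd).1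
      rw [pvFoldl_get?_not_mem src i rest _ op hr]
      unfold pvBStep
      cases hd : d.get? op with
      | some v => rw [if_neg (by simp), hd]; rfl
      | none =>
        by_cases hm : (src.drop i).take op.length = op
        · rw [if_pos ⟨by simp, hm⟩, PySem.Dict.get?_insert_self]
          simp [hm]
        · rw [if_neg (fun hc => hm hc.2)]
          simp [hd, hm]
    · have hmem' : op ∈ rest := (List.mem_cons.mp hmem).resolve_left (fun h2 => he h2)
      have hget : (pvBStep src i d op0).get? op = d.get? op := by
        unfold pvBStep
        split
        · exact PySem.Dict.get?_insert_of_ne d i he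
        · rfl
      rw [ih _ hmem' (List.nodup_cons.mp hnd).2, hget]

lemma pvBScanGo_get? (src : List Char) (ops : List (List Char))
    (hops : ∀ op ∈ ops, pvGood op) (hnd : ops.Nodup) :
    ∀ (rest : List Char) (i : Nat) (first : PySem.Dict (List Char) Nat),
      rest = src.drop i →
      (∀ op ∈ ops, first.get? op = (List.range i).find? (pvC src op)) →
      ∀ op ∈ ops, (pvBScanGo src ops i rest (pvBal (src.take i)) first).get? op =
        (List.range src.length).find? (pvC src op) := by
  intro rest
  induction rest with
  | nil =>
    intro i first hrest hfirst op hop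
    have hil : src.length ≤ i := by
      by_contra hlt
      push Not at hlt
      have hne : src.drop i ≠ [] := by
        simp [List.drop_eq_nil_iff]
        omega
      exact hne hrest.symm
    have hg := hops op hop
    have hop1 : 1 ≤ op.length := by
      cases op with
      | nil => exact absurd hg (by simp [pvGood])
      | cons a b => simp
    rw [pvBScanGo, hfirst op hop,
      pvFind_range_stable src op hg (show src.length + 1 - op.length ≤ i by omega),
      pvFind_range_stable src op hg (show src.length + 1 - op.length ≤ src.length by omega)]
  | cons ch tl ih =>
    intro i first hrest hfirst op hop
    have hi : i < src.length := by
      by_contra hge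
      push Not at hge
      have : src.drop i = [] := by simp [List.drop_eq_nil_iff]; omega
      rw [this] at hrest
      exact absurd hrest (by simp)
    have hch : src[i]? = some ch := by
      have h0 : (src.drop i)[0]? = some ch := by rw [← hrest]; rfl
      rw [List.getElem?_drop] at h0
      simpa using h0
    have hgd : src.getD i ' ' = ch := by
      rw [List.getD_eq_getElem?_getD, hch]; rfl
    have htl : tl = src.drop (i + 1) := by
      have := congrArg List.tail hrest
      simpa [List.tail_drop] using this
    have hstep : ∀ (p : Nat → Bool), (List.range (i + 1)).find? p =
        ((List.range i).find? p).orElse (fun _ => if p i then some i else none) := by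
      intro p
      rw [List.range_succ, List.find?_append]
      cases hfi : List.find? p (List.range i) <;> cases hpi : p i <;>
        simp [List.find?, hpi, Option.orElse]
    by_cases h1 : ch = ')'
    · have hbal : pvBal (src.take i) - 1 = pvBal (src.take (i + 1)) := by
        rw [pvBal_take_succ, hgd, h1]
        simp [pvStep]
      rw [pvBScanGo, if_pos h1, hbal]
      refine ih (i + 1) first htl ?_ op hop
      intro op' hop'
      have hC : pvC src op' i = false := by
        by_cases hm : (src.drop i).take op'.length = op'
        · have h2 := (pvMatch_getD (hops op' hop') hm).2
          rw [hgd] at h2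
          exact absurd h1 h2
        · simp [pvC, hm]
      rw [hfirst op' hop', hstep, hC]
      cases (List.range i).find? (pvC src op') <;> rfl
    · by_cases h2 : ch = '('
      · have hbal : pvBal (src.take i) + 1 = pvBal (src.take (i + 1)) := by
          rw [pvBal_take_succ, hgd, h2]
          simp [pvStep]
        rw [pvBScanGo, if_neg h1, if_pos h2, hbal]
        refine ih (i + 1) first htl ?_ op hop
        intro op' hop'
        have hC : pvC src op' i = false := by
          by_cases hm : (src.drop i).take op'.length = op'
          · have h3 := (pvMatch_getD (hops op' hop') hm).1
            rw [hgd] at h3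
            exact absurd h2 h3
          · simp [pvC, hm]
        rw [hfirst op' hop', hstep, hC]
        cases (List.range i).find? (pvC src op') <;> rfl
      · have hbal : pvBal (src.take i) = pvBal (src.take (i + 1)) := by
          rw [pvBal_take_succ, hgd]
          simp [pvStep, h1, h2]
        by_cases hb : pvBal (src.take i) = 0
        · rw [pvBScanGo, if_neg h1, if_neg h2, if_pos hb, hbal]
          refine ih (i + 1) _ htl ?_ op hop
          intro op' hop'
          rw [pvFoldl_get?_mem src i ops first op' hop' hnd, hfirst op' hop', hstep]
          congr 1
          funext u
          by_cases hm : (src.drop i).take op'.length = op' <;> simp [pvC, hm, hb]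
        · rw [pvBScanGo, if_neg h1, if_neg h2, if_neg hb, hbal]
          refine ih (i + 1) first htl ?_ op hop
          intro op' hop'
          rw [hfirst op' hop', hstep]
          have hC : pvC src op' i = false := by simp [pvC, hb]
          rw [hC]
          cases (List.range i).find? (pvC src op') <;> rfl

lemma pvOuter_eq_lookup (src : List Char) (first : PySem.Dict (List Char) Nat) :
    ∀ (ops : List (List Char)), (∀ op ∈ ops, pvGood op) →
      (∀ op ∈ ops, first.get? op = (List.range (src.length + 1 - op.length)).find? (pvC src op)) →
      pvAOuter src ops = pvBLookup src first ops := by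
  intro ops
  induction ops with
  | nil => intro _ _; rfl
  | cons op rest ih =>
    intro hops hfirst
    have hg := hops op List.mem_cons_self
    have hA : pvAScan src op (List.range (src.length + 1 - op.length)) 0 = first.get? op := by
      rw [hfirst op List.mem_cons_self, List.range_eq_range']
      exact pvAScan_eq_find src op hg _ 0
    simp only [pvAOuter, pvBLookup]
    rw [hA]
    cases first.get? op with
    | some p => rfl
    | none =>
      exact ih (fun o ho => hops o (List.mem_cons_of_mem _ ho))
        (fun o ho => hfirst o (List.mem_cons_of_mem _ ho))

-- ===== VERDICT (by name: the statement is the Claim_ definition above) =====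
theorem split_first_bool_op_spec : Claim_equal_split_first_bool_op := by
  intro source _
  unfold Spec_split_first_bool_op split_first_bool_op split_first_bool_op_alt
  have hops : ∀ op ∈ pvOps, pvGood op := by
    intro op hop
    fin_cases hop <;> exact ⟨by decide, by decide⟩
  have hnd : pvOps.Nodup := by decide
  apply pvOuter_eq_lookup source.toList _ pvOps hops
  intro op hop
  have hg := hops op hop
  have hop1 : 1 ≤ op.length := by
    cases op with
    | nil => exact absurd hg (by simp [pvGood])
    | cons a b => simp
  have h := pvBScanGo_get? source.toList pvOps hops hnd source.toList 0 PySem.Dict.empty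
    List.drop_zero.symm (by intro o _; simp [PySem.Dict.get?_empty]) op hop
  rw [show (0 : Int) = pvBal (List.take 0 source.toList) from rfl, h,
    pvFind_range_stable source.toList op hg (by omega)]
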